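-- pv_equiv track=rewrite | github.com/mortbopet/leros-sim | simdriver.py | arrayAddition
-- ===== SOURCE A (Python) =====
-- def arrayAddition(n):
--     A = [0] * n
--     B = [0] * n
--     C = [0] * n
--     s = 0
--
--     for i in range(0, n):
--         A[i] = i
--         B[i] = i - 1
--
--     for i in range(0, n):
--         C[i] = A[i] + B[i]
--
--     for i in range(0, n):
--         s += C[i]
--
--     return s
-- ===== SOURCE B (Python) =====
-- def arrayAddition(n):
--     # sum of C[i] = i + (i-1) for i in 0..n-1 is n*n - 2*n; empty for n <= 0
--     return n * n - 2 * n if n > 0 else 0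
-- ===== Notes on version B (the rewrite author's own statement) =====
-- stated objective: faster
-- what changed: Replaced the three O(n) array-building loops by the closed-form formula n*n - 2*n (0 for non-positive n).
import Mathlib
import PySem

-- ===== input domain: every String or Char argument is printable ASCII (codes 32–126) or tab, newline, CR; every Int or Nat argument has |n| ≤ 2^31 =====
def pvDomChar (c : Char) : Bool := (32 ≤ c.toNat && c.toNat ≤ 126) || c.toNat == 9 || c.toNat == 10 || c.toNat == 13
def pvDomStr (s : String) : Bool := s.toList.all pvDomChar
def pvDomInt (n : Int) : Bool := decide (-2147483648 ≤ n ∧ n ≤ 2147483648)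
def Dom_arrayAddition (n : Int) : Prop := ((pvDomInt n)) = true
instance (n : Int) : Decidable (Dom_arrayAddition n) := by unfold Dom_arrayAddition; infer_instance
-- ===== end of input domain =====

-- B replaces A's three array-building loops by the closed-form n*n - 2*n (0 for n ≤ 0): O(1) instead of O(n).

-- ===== PORT A =====
def arrayAddition (n : Int) : Int :=
  let A0 : List Int := PySem.List.pyRepeat [0] n
  let B0 : List Int := PySem.List.pyRepeat [0] n
  let C0 : List Int := PySem.List.pyRepeat [0] n
  let s0 : Int := 0
  let AB := (PySem.List.pyRange 0 n 1).foldl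
      (fun (p : List Int × List Int) i =>
        (PySem.List.pySetD p.1 i i, PySem.List.pySetD p.2 i (i - 1)))
      (A0, B0)
  let C := (PySem.List.pyRange 0 n 1).foldl
      (fun c i => PySem.List.pySetD c i
        (PySem.List.pyGetD AB.1 i 0 + PySem.List.pyGetD AB.2 i 0)) C0
  (PySem.List.pyRange 0 n 1).foldl (fun s i => s + PySem.List.pyGetD C i 0) s0

-- ===== PORT B =====
def arrayAddition_alt (n : Int) : Int := if n > 0 then n * n - 2 * n else 0

-- ===== PRECONDITION & SPEC =====
def Spec_arrayAddition (n : Int) (out : Int) : Prop := out = arrayAddition_alt n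
instance (n : Int) (out : Int) : Decidable (Spec_arrayAddition n out) := by unfold Spec_arrayAddition; infer_instance

-- ===== CLAIM (what is proved, stated in full; the proofs are below) =====
def Claim_equal_arrayAddition : Prop := ∀ (n : Int), Dom_arrayAddition n → Spec_arrayAddition n (arrayAddition n)

-- ===== LEMMAS AND PROOFS =====

-- a paired foldl splits into two independent foldls
theorem foldl_pair {α : Type} (g h : List Int → α → List Int) (l : List α)
    (x y : List Int) :
    l.foldl (fun (p : List Int × List Int) i => (g p.1 i, h p.2 i)) (x, y)
      = (l.foldl g x, l.foldl h y) := by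
  induction l generalizing x y with
  | nil => rfl
  | cons a t ih => simpa using ih (g x a) (h y a)

-- writing f i into slot i for every i in [a, n) turns xs into take a ++ map f (range a n)
theorem foldl_set_range (f : Int → Int) (n : Int) :
    ∀ (a : Int) (xs : List Int), 0 ≤ a → xs.length = n.toNat →
    (PySem.List.pyRange a n 1).foldl (fun l i => PySem.List.pySetD l i (f i)) xs
      = xs.take a.toNat ++ (PySem.List.pyRange a n 1).map f := by
  intro a xs ha hlen
  by_cases hlt : a < n
  · have : (n - a).toNat = (n - (a+1)).toNat + 1 := by omega
    rw [PySem.List.pyRange_one_cons hlt]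
    simp only [List.foldl_cons, List.map_cons]
    have hset : PySem.List.pySetD xs a (f a) = xs.set a.toNat (f a) :=
      PySem.List.pySetD_of_nonneg xs (f a) ha
    have hlen' : (xs.set a.toNat (f a)).length = n.toNat := by simpa using hlen
    have ih := foldl_set_range f n (a + 1) (xs.set a.toNat (f a)) (by omega) hlen'
    rw [hset, ih]
    have hanat : a.toNat < xs.length := by omega
    have h1 : (xs.set a.toNat (f a)).take (a + 1).toNat
        = xs.take a.toNat ++ [f a] := by
      have : (a + 1).toNat = a.toNat + 1 := by omega
      rw [this, List.take_add_one, List.getElem?_set_self (by simpa using hanat)]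
      simp [List.take_set, List.set_eq_of_length_le]
    rw [h1, List.append_assoc]; rfl
  · have hnil : PySem.List.pyRange a n 1 = [] := PySem.List.pyRange_one_eq_nil (by omega)
    rw [hnil]
    simp only [List.foldl_nil, List.map_nil, List.append_nil]
    rw [List.take_of_length_le (by omega)]
termination_by a _ _ _ => (n - a).toNat
decreasing_by omega

theorem sum_range_closed (m : Nat) :
    ((PySem.List.pyRange 0 (m : Int) 1).map (fun i => i + (i - 1))).sum
      = (m : Int) * m - 2 * m := by
  induction m with
  | zero => simp
  | succ k ih =>
    have : ((k : Int) + 1) = ((k + 1 : Nat) : Int) := by push_cast; ring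
    rw [← this, PySem.List.pyRange_one_succ_right (by positivity)]
    simp only [List.map_append, List.sum_append, ih]
    simp; ring

theorem arrayAddition_closed (n : Int) :
    arrayAddition n = if n > 0 then n * n - 2 * n else 0 := by
  simp only [arrayAddition]
  have hlen : (PySem.List.pyRepeat ([0] : List Int) n).length = n.toNat := by
    simp [PySem.List.pyRepeat_singleton]
  rw [foldl_pair (fun l i => PySem.List.pySetD l i i)
      (fun l i => PySem.List.pySetD l i (i - 1)) (PySem.List.pyRange 0 n 1)]
  rw [foldl_set_range (fun i => i) n 0 _ le_rfl hlen,
      foldl_set_range (fun i => i - 1) n 0 _ le_rfl hlen,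
      foldl_set_range _ n 0 _ le_rfl hlen]
  simp only [Int.toNat_zero, List.take_zero, List.nil_append]
  by_cases hpos : 0 < n
  · have hC : ∀ i ∈ PySem.List.pyRange 0 n 1,
        PySem.List.pyGetD ((PySem.List.pyRange 0 n 1).map (fun i => i)) i 0
          + PySem.List.pyGetD ((PySem.List.pyRange 0 n 1).map (fun i => i - 1)) i 0
        = i + (i - 1) := by
      intro i hi
      rcases (PySem.List.mem_pyRange_one).1 hi with ⟨h0, h1⟩
      rw [PySem.List.pyGetD_map_pyRange_of_nonneg _ _ _ _ h0 h1,
          PySem.List.pyGetD_map_pyRange_of_nonneg _ _ _ _ h0 h1]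
    rw [List.map_congr_left hC]
    rw [PySem.List.foldl_congr_mem (PySem.List.pyRange 0 n 1)
        (fun (s i : Int) => s +
          PySem.List.pyGetD ((PySem.List.pyRange 0 n 1).map (fun j => j + (j - 1))) i 0)
        (fun (s i : Int) => s + (i + (i - 1))) 0
        (fun acc i hi => by
          rcases (PySem.List.mem_pyRange_one).1 hi with ⟨h0, h1⟩
          simp only []
          rw [PySem.List.pyGetD_map_pyRange_of_nonneg _ _ _ _ h0 h1])]
    rw [PySem.List.foldl_add (PySem.List.pyRange 0 n 1) (fun i : Int => i + (i - 1)) 0]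
    have hm : n = ((n.toNat : Nat) : Int) := by omega
    rw [hm, sum_range_closed]
    rw [if_pos (show ((n.toNat : Nat) : Int) > 0 by omega)]
    ring
  · have hnil : PySem.List.pyRange 0 n 1 = [] := PySem.List.pyRange_one_eq_nil (by omega)
    simp [hnil, hpos]

-- ===== VERDICT (by name: the statement is the Claim_ definition above) =====
theorem arrayAddition_spec : Claim_equal_arrayAddition := by
  intro n _
  unfold Spec_arrayAddition arrayAddition_alt
  exact arrayAddition_closed n
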